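-- pv_equiv track=rewrite | github.com/scsewzj/comparativeGenomics | Oryza_Brachyantha/PyScripts/mcl_cluster_size_plot.py | count_categories_with_genes
-- ===== SOURCE A (Python) =====
-- def count_categories_with_genes(clusters):
--     categories = {
--         "size_2": {"clusters": 0, "genes": set()},
--         "size_3_9": {"clusters": 0, "genes": set()},
--         "size_10_19": {"clusters": 0, "genes": set()},
--         "size_20_plus": {"clusters": 0, "genes": set()}
--     }
--
--     for genes in clusters:
--         size = len(genes)
--         if size == 2:
--             categories["size_2"]["clusters"] += 1
--             categories["size_2"]["genes"].update(genes)
--         elif 3 <= size <= 9: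
--             categories["size_3_9"]["clusters"] += 1
--             categories["size_3_9"]["genes"].update(genes)
--         elif 10 <= size <= 19:
--             categories["size_10_19"]["clusters"] += 1
--             categories["size_10_19"]["genes"].update(genes)
--         elif size >= 20:
--             categories["size_20_plus"]["clusters"] += 1
--             categories["size_20_plus"]["genes"].update(genes)
--
--     # Convert gene sets to counts
--     for cat in categories:
--         categories[cat]["genes"] = len(categories[cat]["genes"])
--
--     return categories
-- ===== SOURCE B (Python) =====
-- def count_categories_with_genes(clusters):
--     # First pass: partition the clusters of size >= 2 into the four size buckets.
--     b2, b39, b1019, b20p = [], [], [], []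
--     for genes in clusters:
--         size = len(genes)
--         if size < 2:
--             continue
--         elif size == 2:
--             b2.append(genes)
--         elif size <= 9:
--             b39.append(genes)
--         elif size <= 19:
--             b1019.append(genes)
--         else:
--             b20p.append(genes)
--
--     # Second pass: reduce each bucket to its cluster count and distinct-gene count.
--     def summarize(groups):
--         distinct = set()
--         for g in groups:
--             distinct.update(g)
--         return {"clusters": len(groups), "genes": len(distinct)}
--
--     return {
--         "size_2": summarize(b2),
--         "size_3_9": summarize(b39),
--         "size_10_19": summarize(b1019),
--         "size_20_plus": summarize(b20p),
--     }
-- ===== Notes on version B (the rewrite author's own statement) =====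
-- stated objective: alternative
-- what changed: Replaces A's single interleaved loop that mutates per-category counters and gene sets with a two-pass partition-then-reduce: first partition clusters into four size buckets, then summarize each bucket (count and distinct-gene union) separately.
import Mathlib
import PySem

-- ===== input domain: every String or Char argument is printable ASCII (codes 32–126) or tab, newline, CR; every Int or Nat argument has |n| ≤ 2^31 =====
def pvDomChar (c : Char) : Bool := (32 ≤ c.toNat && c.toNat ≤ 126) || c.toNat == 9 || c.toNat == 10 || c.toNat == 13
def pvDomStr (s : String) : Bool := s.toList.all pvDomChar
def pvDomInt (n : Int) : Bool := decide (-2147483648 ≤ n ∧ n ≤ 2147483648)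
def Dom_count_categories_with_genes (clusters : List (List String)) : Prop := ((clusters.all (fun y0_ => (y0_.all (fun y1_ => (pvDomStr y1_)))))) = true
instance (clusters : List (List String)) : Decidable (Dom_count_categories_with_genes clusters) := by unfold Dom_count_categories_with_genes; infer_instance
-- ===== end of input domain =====

-- B replaces A's single interleaved accumulate loop by a two-pass partition-then-reduce
-- of the clusters into size buckets (alternative decomposition, same cost).


-- ===== PORT A =====
-- A's loop state: per category a (clusters count, genes set) pair, in the dict's key order.
def pvStateA : Type := (Int × PySem.Set String) × (Int × PySem.Set String) × (Int × PySem.Set String) × (Int × PySem.Set String)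

-- loop body of A
def pvStepA (s : pvStateA) (genes : List String) : pvStateA :=
  let size := PySem.List.len genes
  if size = 2 then ((s.1.1 + 1, PySem.Set.update s.1.2 genes), s.2.1, s.2.2.1, s.2.2.2)
  else if 3 ≤ size ∧ size ≤ 9 then (s.1, (s.2.1.1 + 1, PySem.Set.update s.2.1.2 genes), s.2.2.1, s.2.2.2)
  else if 10 ≤ size ∧ size ≤ 19 then (s.1, s.2.1, (s.2.2.1.1 + 1, PySem.Set.update s.2.2.1.2 genes), s.2.2.2)
  else if 20 ≤ size then (s.1, s.2.1, s.2.2.1, (s.2.2.2.1 + 1, PySem.Set.update s.2.2.2.2 genes))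
  else s

def count_categories_with_genes (clusters : List (List String)) : List (String × List (String × Int)) :=
  let st := clusters.foldl pvStepA ((0, PySem.Set.empty), (0, PySem.Set.empty), (0, PySem.Set.empty), (0, PySem.Set.empty))
  -- the final pass converts each genes set to its length
  [("size_2", [("clusters", st.1.1), ("genes", PySem.Set.len st.1.2)]),
   ("size_3_9", [("clusters", st.2.1.1), ("genes", PySem.Set.len st.2.1.2)]),
   ("size_10_19", [("clusters", st.2.2.1.1), ("genes", PySem.Set.len st.2.2.1.2)]),
   ("size_20_plus", [("clusters", st.2.2.2.1), ("genes", PySem.Set.len st.2.2.2.2)])]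

-- ===== PORT B =====
-- B's first-pass state: the four buckets of clusters.
def pvBuckets : Type := List (List String) × List (List String) × List (List String) × List (List String)

-- loop body of B's partition pass
def pvStepB (b : pvBuckets) (genes : List String) : pvBuckets :=
  let size := PySem.List.len genes
  if size < 2 then b
  else if size = 2 then (b.1 ++ [genes], b.2.1, b.2.2.1, b.2.2.2)
  else if size ≤ 9 then (b.1, b.2.1 ++ [genes], b.2.2.1, b.2.2.2)
  else if size ≤ 19 then (b.1, b.2.1, b.2.2.1 ++ [genes], b.2.2.2)
  else (b.1, b.2.1, b.2.2.1, b.2.2.2 ++ [genes])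

-- 'distinct.update(g)' loop of summarize
def pvDistinct (groups : List (List String)) : PySem.Set String :=
  groups.foldl (fun distinct g => PySem.Set.update distinct g) PySem.Set.empty

-- B's summarize
def pvSummarize (groups : List (List String)) : List (String × Int) :=
  [("clusters", PySem.List.len groups), ("genes", PySem.Set.len (pvDistinct groups))]

def count_categories_with_genes_alt (clusters : List (List String)) : List (String × List (String × Int)) :=
  let p := clusters.foldl pvStepB ([], [], [], [])
  [("size_2", pvSummarize p.1),
   ("size_3_9", pvSummarize p.2.1),
   ("size_10_19", pvSummarize p.2.2.1),
   ("size_20_plus", pvSummarize p.2.2.2)]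

-- ===== PRECONDITION & SPEC =====
def Spec_count_categories_with_genes (clusters : List (List String)) (out : List (String × List (String × Int))) : Prop := out = count_categories_with_genes_alt clusters
instance (clusters : List (List String)) (out : List (String × List (String × Int))) : Decidable (Spec_count_categories_with_genes clusters out) := by unfold Spec_count_categories_with_genes; infer_instance

-- ===== CLAIM (what is proved, stated in full; the proofs are below) =====
def Claim_equal_count_categories_with_genes : Prop := ∀ (clusters : List (List String)), Dom_count_categories_with_genes clusters → Spec_count_categories_with_genes clusters (count_categories_with_genes clusters)

-- ===== LEMMAS AND PROOFS =====
-- A's per-category summary (count, set) of a bucket of clusters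
def pvImg (gs : List (List String)) : Int × PySem.Set String := (PySem.List.len gs, pvDistinct gs)

lemma pvImg_append (gs : List (List String)) (g : List String) :
    pvImg (gs ++ [g]) = (PySem.List.len gs + 1, PySem.Set.update (pvDistinct gs) g) := by
  simp [pvImg, pvDistinct, PySem.List.len_eq]

lemma pv_fold_eq (clusters : List (List String)) :
    ∀ b2 b3 b10 b20 : List (List String),
      clusters.foldl pvStepA (pvImg b2, pvImg b3, pvImg b10, pvImg b20)
      = (fun q : pvBuckets => (pvImg q.1, pvImg q.2.1, pvImg q.2.2.1, pvImg q.2.2.2))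
          (clusters.foldl pvStepB (b2, b3, b10, b20)) := by
  induction clusters with
  | nil => intro b2 b3 b10 b20; rfl
  | cons g rest ih =>
    intro b2 b3 b10 b20
    have hstep : pvStepA (pvImg b2, pvImg b3, pvImg b10, pvImg b20) g
        = (fun q : pvBuckets => (pvImg q.1, pvImg q.2.1, pvImg q.2.2.1, pvImg q.2.2.2))
            (pvStepB (b2, b3, b10, b20) g) := by
      have hlen : (0 : Int) ≤ PySem.List.len g := by
        simp [PySem.List.len_eq]
      simp only [pvStepA, pvStepB]
      split_ifs with h1 h2 h3 h4 h5 h6 h7 h8 h9 h10 h11 <;>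
        first
          | (exfalso; omega)
          | rfl
          | (simp only [pvImg_append]; rfl)
    simp only [List.foldl_cons, hstep]
    exact ih _ _ _ _

lemma pvImg_nil : pvImg [] = (0, PySem.Set.empty) := rfl

-- ===== VERDICT (by name: the statement is the Claim_ definition above) =====
theorem count_categories_with_genes_spec : Claim_equal_count_categories_with_genes := by
  intro clusters _
  unfold Spec_count_categories_with_genes count_categories_with_genes count_categories_with_genes_alt
  have h := pv_fold_eq clusters [] [] [] []
  rw [pvImg_nil] at h
  rw [h]
  simp [pvSummarize, pvImg]
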